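-- pv_equiv track=rewrite | github.com/hannahbull/subtitle_align | utils.py | get_labels_start_end_time
-- ===== SOURCE A (Python) =====
-- from typing import List, Tuple
--
-- def get_labels_start_end_time(
--         frame_wise_labels: List[int],
--         bg_class: List[int]
-- ) -> Tuple[List[int], List[int], List[int]]:
--     """Given a single sequence of frame level labels, find: (i) the start index,
--     (ii) the end index and (iii) the label, of each contiguous subsequence of labels.
--
--     Args:
--         frame_wise_labels: a single sequence of frame-level labels
--         bg_class: if given, skip labels that fall within this list of background classes.
--
--     Returns:
--         A tuple consisting of three elements:
--             the label associated with each subsequence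
--             the start index associated with each subsequence
--             the end index associated with each subsequence
--     """
--     labels = []
--     starts = []
--     ends = []
--     last_label = frame_wise_labels[0]
--     if frame_wise_labels[0] not in bg_class:
--         labels.append(frame_wise_labels[0])
--         starts.append(0)
--     for i in range(len(frame_wise_labels)):
--         if frame_wise_labels[i] != last_label:
--             if frame_wise_labels[i] not in bg_class:
--                 labels.append(frame_wise_labels[i])
--                 starts.append(i)
--             if last_label not in bg_class:
--                 ends.append(i)
--             last_label = frame_wise_labels[i]
--     if last_label not in bg_class:
--         ends.append(i + 1)
--     return labels, starts, ends
-- ===== SOURCE B (Python) =====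
-- from typing import List, Tuple
--
-- def get_labels_start_end_time(
--         frame_wise_labels: List[int],
--         bg_class: List[int]
-- ) -> Tuple[List[int], List[int], List[int]]:
--     # Staged: (1) find change points by zipping adjacent frames, (2) pair run heads
--     # with run ends, (3) filter out background runs and unzip.
--     n = len(frame_wise_labels)
--     changes = [(i, b) for i, (a, b)
--                in enumerate(zip(frame_wise_labels, frame_wise_labels[1:]), 1) if a != b]
--     run_heads = [(0, frame_wise_labels[0])] + changes
--     run_ends = [i for i, _ in changes] + [n]
--     keep = [(lab, s, e) for (s, lab), e in zip(run_heads, run_ends)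
--             if lab not in bg_class]
--     labels = [lab for lab, _, _ in keep]
--     starts = [s for _, s, _ in keep]
--     ends = [e for _, _, e in keep]
--     return labels, starts, ends
-- ===== Notes on version B (the rewrite author's own statement) =====
-- stated objective: alternative
-- what changed: Replaces A's single stateful pass tracking last_label by a staged, stateless pipeline: a zip of adjacent frames yields the change points, run heads are zipped with run ends, and background runs are filtered out before unzipping into the three lists.
import Mathlib
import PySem

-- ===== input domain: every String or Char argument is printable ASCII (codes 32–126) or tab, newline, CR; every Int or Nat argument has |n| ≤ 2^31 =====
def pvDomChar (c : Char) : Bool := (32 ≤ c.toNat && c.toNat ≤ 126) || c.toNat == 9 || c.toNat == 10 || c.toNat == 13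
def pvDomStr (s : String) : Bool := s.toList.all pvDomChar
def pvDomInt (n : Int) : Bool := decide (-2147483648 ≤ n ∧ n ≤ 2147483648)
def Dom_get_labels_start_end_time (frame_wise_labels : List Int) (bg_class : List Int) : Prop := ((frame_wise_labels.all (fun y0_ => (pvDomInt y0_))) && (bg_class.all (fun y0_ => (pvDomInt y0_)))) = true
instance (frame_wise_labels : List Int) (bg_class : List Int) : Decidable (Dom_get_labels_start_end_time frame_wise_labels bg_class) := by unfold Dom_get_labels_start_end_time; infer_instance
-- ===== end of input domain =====

-- B replaces A's single stateful last_label pass by a staged, stateless pipeline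
-- (change points from a zip of adjacent frames, run heads zipped with run ends,
-- background runs filtered out, then unzipped); Pre_ excludes the empty list, on
-- which both Pythons raise IndexError reading frame_wise_labels[0].


-- ===== PORT A =====
-- loop body of A's `for i in range(len(frame_wise_labels))`; state = (labels, starts, ends, last_label, i)
def glsetStep (bg_class : List Int) (st : List Int × List Int × List Int × Int × Int)
    (iv : Int × Int) : List Int × List Int × List Int × Int × Int :=
  let (labels, starts, ends, last_label, _) := st
  let (i, v) := iv
  if v ≠ last_label then
    let labels := if v ∉ bg_class then labels ++ [v] else labels
    let starts := if v ∉ bg_class then starts ++ [i] else starts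
    let ends := if last_label ∉ bg_class then ends ++ [i] else ends
    (labels, starts, ends, v, i)
  else
    (labels, starts, ends, last_label, i)

def get_labels_start_end_time (frame_wise_labels : List Int) (bg_class : List Int) : List Int × List Int × List Int :=
  -- frame_wise_labels[0]: Python raises IndexError on []; that input is excluded by Pre_, default 0 here
  let first := PySem.List.pyGetD frame_wise_labels 0 0
  let labels : List Int := if first ∉ bg_class then [] ++ [first] else []
  let starts : List Int := if first ∉ bg_class then [] ++ [(0 : Int)] else []
  -- Python's `i` is undefined before the loop; -1 stands for that (unreachable under Pre_)
  let st := (PySem.List.pyRange 0 frame_wise_labels.length 1).foldl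
      (fun st i => glsetStep bg_class st (i, PySem.List.pyGetD frame_wise_labels i 0))
      (labels, starts, ([] : List Int), first, (-1 : Int))
  let (labels, starts, ends, last_label, i) := st
  let ends := if last_label ∉ bg_class then ends ++ [i + 1] else ends
  (labels, starts, ends)

-- ===== PORT B =====
def get_labels_start_end_time_alt (frame_wise_labels : List Int) (bg_class : List Int) : List Int × List Int × List Int :=
  let n : Int := frame_wise_labels.length
  -- changes = [(i, b) for i, (a, b) in enumerate(zip(fw, fw[1:]), 1) if a != b]
  let changes := ((PySem.List.enumerate
      (frame_wise_labels.zip (PySem.List.slice frame_wise_labels (some 1) none)) 1).filter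
      (fun p => decide (p.2.1 ≠ p.2.2))).map (fun p => (p.1, p.2.2))
  -- run_heads = [(0, fw[0])] + changes   (fw[0]: Python raises IndexError on []; excluded by Pre_)
  let run_heads := ((0 : Int), PySem.List.pyGetD frame_wise_labels 0 0) :: changes
  -- run_ends = [i for i, _ in changes] + [n]
  let run_ends := changes.map (·.1) ++ [n]
  -- keep = [(lab, s, e) for (s, lab), e in zip(run_heads, run_ends) if lab not in bg_class]
  let keep := (run_heads.zip run_ends).filter (fun p => decide (p.1.2 ∉ bg_class))
  (keep.map (·.1.2), keep.map (·.1.1), keep.map (·.2))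

-- ===== PRECONDITION & SPEC =====
-- Pre_ excludes only the empty list, on which Python A (and B) raises IndexError reading frame_wise_labels[0].
def Pre_get_labels_start_end_time (frame_wise_labels : List Int) (bg_class : List Int) : Prop :=
  frame_wise_labels ≠ []
instance (frame_wise_labels : List Int) (bg_class : List Int) : Decidable (Pre_get_labels_start_end_time frame_wise_labels bg_class) := by unfold Pre_get_labels_start_end_time; infer_instance

def pvWitness_get_labels_start_end_time : List Int × List Int := ([1, 1, 2, 0, 0, 3], [0])

def Spec_get_labels_start_end_time (frame_wise_labels : List Int) (bg_class : List Int) (out : List Int × List Int × List Int) : Prop := out = get_labels_start_end_time_alt frame_wise_labels bg_class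
instance (frame_wise_labels : List Int) (bg_class : List Int) (out : List Int × List Int × List Int) : Decidable (Spec_get_labels_start_end_time frame_wise_labels bg_class out) := by unfold Spec_get_labels_start_end_time; infer_instance

-- ===== CLAIM (what is proved, stated in full; the proofs are below) =====
def Claim_equal_get_labels_start_end_time : Prop := ∀ (frame_wise_labels : List Int) (bg_class : List Int), Dom_get_labels_start_end_time frame_wise_labels bg_class → Pre_get_labels_start_end_time frame_wise_labels bg_class → Spec_get_labels_start_end_time frame_wise_labels bg_class (get_labels_start_end_time frame_wise_labels bg_class)

-- ===== LEMMAS AND PROOFS =====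

-- A's behaviour on the tail, as a structural recursion: pvSpec bg last k t is what A appends
-- after having fully handled the run of `last` up to position k-1.
def pvSpec (bg : List Int) : Int → Int → List Int → List Int × List Int × List Int
  | last, k, [] => ([], [], if last ∉ bg then [k] else [])
  | last, k, x :: xs =>
      if x = last then pvSpec bg last (k + 1) xs
      else
        let (L, S, E) := pvSpec bg x (k + 1) xs
        ((if x ∉ bg then x :: L else L),
         (if x ∉ bg then k :: S else S),
         (if last ∉ bg then k :: E else E))

-- B's change-point list, as a structural recursion: pvChg a xs k = the (index, new label)
-- pairs of the adjacency comprehension over a::xs with enumeration starting at k.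
def pvChg : Int → List Int → Int → List (Int × Int)
  | _, [], _ => []
  | a, b :: t, k => if a ≠ b then (k, b) :: pvChg b t (k + 1) else pvChg b t (k + 1)

-- B's kept-runs triple, as a structural recursion: current run has label x, head index s,
-- and the remaining frames are xs with the next position being k.
def pvT (bg : List Int) : Int → List Int → Int → Int → List Int × List Int × List Int
  | x, [], k, s => if x ∉ bg then ([x], [s], [k]) else ([], [], [])
  | x, b :: t, k, s =>
      if x = b then pvT bg x t (k + 1) s
      else
        let (L, S, E) := pvT bg b t (k + 1) k
        if x ∉ bg then (x :: L, s :: S, k :: E) else (L, S, E)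

theorem glset_fold_spec (bg : List Int) (t : List Int) :
    ∀ (k : Int) (L S E : List Int) (last : Int),
    (fun (st : List Int × List Int × List Int × Int × Int) =>
        (st.1, st.2.1, if st.2.2.2.1 ∉ bg then st.2.2.1 ++ [st.2.2.2.2 + 1] else st.2.2.1))
      ((PySem.List.enumerate t k).foldl (glsetStep bg) (L, S, E, last, k - 1)) =
    (L ++ (pvSpec bg last k t).1, S ++ (pvSpec bg last k t).2.1, E ++ (pvSpec bg last k t).2.2) := by
  induction t with
  | nil =>
      intro k L S E last
      simp only [PySem.List.enumerate_nil, List.foldl_nil, pvSpec]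
      by_cases h : last ∉ bg <;> simp [h, sub_add_cancel]
  | cons x xs ih =>
      intro k L S E last
      rw [PySem.List.enumerate_cons, List.foldl_cons]
      by_cases hx : x = last
      · have hstep : glsetStep bg (L, S, E, last, k - 1) (k, x) = (L, S, E, last, k) := by
          simp [glsetStep, hx]
        rw [hstep]
        have := ih (k + 1) L S E last
        rw [show k + 1 - 1 = k by ring] at this
        rw [this]
        simp [pvSpec, hx]
      · have hstep : glsetStep bg (L, S, E, last, k - 1) (k, x) =
            ((if x ∉ bg then L ++ [x] else L), (if x ∉ bg then S ++ [k] else S),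
             (if last ∉ bg then E ++ [k] else E), x, k) := by
          simp [glsetStep, hx]
        rw [hstep]
        have := ih (k + 1) (if x ∉ bg then L ++ [x] else L) (if x ∉ bg then S ++ [k] else S)
            (if last ∉ bg then E ++ [k] else E) x
        rw [show k + 1 - 1 = k by ring] at this
        rw [this]
        simp only [pvSpec, if_neg hx]
        by_cases h1 : x ∉ bg <;> by_cases h2 : last ∉ bg <;> simp [h1, h2]

theorem A_cons (bg : List Int) (x : Int) (xs : List Int) :
    get_labels_start_end_time (x :: xs) bg =
      ((if x ∉ bg then [x] else []) ++ (pvSpec bg x 1 xs).1,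
       (if x ∉ bg then [(0:Int)] else []) ++ (pvSpec bg x 1 xs).2.1,
       (pvSpec bg x 1 xs).2.2) := by
  unfold get_labels_start_end_time
  have hfirst : PySem.List.pyGetD (x :: xs) (0 : Int) 0 = x := by
    simp [PySem.List.pyGetD, PySem.List.pyGet?, PySem.List.pyIdx?]
  rw [hfirst]
  have hbridge :
      List.foldl (fun st i => glsetStep bg st (i, PySem.List.pyGetD (x :: xs) i 0))
        ((if x ∉ bg then [] ++ [x] else []), (if x ∉ bg then [] ++ [(0:Int)] else []),
          ([] : List Int), x, (-1 : Int))
        (PySem.List.pyRange 0 ((x :: xs).length : Int) 1) =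
      List.foldl (glsetStep bg)
        ((if x ∉ bg then [] ++ [x] else []), (if x ∉ bg then [] ++ [(0:Int)] else []),
          ([] : List Int), x, (-1 : Int))
        (PySem.List.enumerate (x :: xs) 0) := by
    rw [PySem.List.enumerate_eq_map_pyRange (d := 0), List.foldl_map]
    simp
  show (match List.foldl (fun st i => glsetStep bg st (i, PySem.List.pyGetD (x :: xs) i 0))
        ((if x ∉ bg then [] ++ [x] else []), (if x ∉ bg then [] ++ [(0:Int)] else []),
          ([] : List Int), x, (-1 : Int))
        (PySem.List.pyRange 0 ((x :: xs).length : Int) 1) with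
    | (labels, starts, ends, last_label, i) =>
      (labels, starts, if last_label ∉ bg then ends ++ [i + 1] else ends)) = _
  rw [hbridge, PySem.List.enumerate_cons, List.foldl_cons]
  have hstep0 : glsetStep bg
      ((if x ∉ bg then [] ++ [x] else []), (if x ∉ bg then [] ++ [(0:Int)] else []),
        ([] : List Int), x, (-1 : Int)) ((0 : Int), x) =
      ((if x ∉ bg then [] ++ [x] else []), (if x ∉ bg then [] ++ [(0:Int)] else []),
        ([] : List Int), x, (0 : Int)) := by
    simp [glsetStep]
  rw [hstep0]
  have hmain := glset_fold_spec bg xs 1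
      (if x ∉ bg then [] ++ [x] else []) (if x ∉ bg then [] ++ [(0:Int)] else []) [] x
  norm_num at hmain
  simp only [List.nil_append, ite_not, zero_add]
  rcases hfold : List.foldl (glsetStep bg)
      ((if x ∈ bg then [] else [x]), (if x ∈ bg then [] else [(0:Int)]),
        ([] : List Int), x, (0 : Int)) (PySem.List.enumerate xs 1) with ⟨a, b, c, d, e⟩
  rw [hfold] at hmain
  obtain ⟨h1, h2, h3⟩ := hmain
  simp only [] at h1 h2 h3 ⊢
  rw [h1, h2, h3]

-- the enumerate/zip/filter/map comprehension computes pvChg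
theorem chg_eq (xs : List Int) : ∀ (x : Int) (k : Int),
    ((PySem.List.enumerate ((x :: xs).zip xs) k).filter
        (fun p => decide (p.2.1 ≠ p.2.2))).map (fun p => (p.1, p.2.2)) = pvChg x xs k := by
  induction xs with
  | nil => intro x k; simp [pvChg, PySem.List.enumerate_nil]
  | cons b t ih =>
      intro x k
      have hz : (x :: b :: t).zip (b :: t) = (x, b) :: (b :: t).zip t := by simp
      rw [hz, PySem.List.enumerate_cons, List.filter_cons]
      by_cases hx : x = b
      · subst hx
        simpa [pvChg] using ih x (k + 1)
      · simp only [pvChg, ne_eq, hx, not_false_eq_true, if_pos rfl]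
        simp [hx]
        simpa using ih b (k + 1)

-- the zip/filter/unzip stage computes pvT
theorem keep_eq (bg : List Int) (xs : List Int) : ∀ (x k s : Int),
    (((((s, x) :: pvChg x xs k).zip
          ((pvChg x xs k).map (·.1) ++ [k + (xs.length : Int)])).filter
          (fun p => decide (p.1.2 ∉ bg))).map (·.1.2),
     ((((s, x) :: pvChg x xs k).zip
          ((pvChg x xs k).map (·.1) ++ [k + (xs.length : Int)])).filter
          (fun p => decide (p.1.2 ∉ bg))).map (·.1.1),
     ((((s, x) :: pvChg x xs k).zip
          ((pvChg x xs k).map (·.1) ++ [k + (xs.length : Int)])).filter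
          (fun p => decide (p.1.2 ∉ bg))).map (·.2)) = pvT bg x xs k s := by
  induction xs with
  | nil =>
      intro x k s
      by_cases h : x ∈ bg <;> simp [pvChg, pvT, h]
  | cons b t ih =>
      intro x k s
      simp only [List.length_cons]
      rw [show k + ((t.length + 1 : Nat) : Int) = (k + 1) + (t.length : Int) from by
        push_cast; ring]
      by_cases hx : x = b
      · subst hx
        simpa [pvChg, pvT] using ih x (k + 1) s
      · have hrest := ih b (k + 1) k
        rw [show pvChg x (b :: t) k = (k, b) :: pvChg b t (k + 1) from by simp [pvChg, hx]]
        rw [show pvT bg x (b :: t) k s = (if x ∉ bg then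
              (x :: (pvT bg b t (k + 1) k).1, s :: (pvT bg b t (k + 1) k).2.1,
               k :: (pvT bg b t (k + 1) k).2.2)
            else pvT bg b t (k + 1) k) from by
          rcases hP : pvT bg b t (k + 1) k with ⟨L, S, E⟩
          by_cases h : x ∈ bg <;> simp [pvT, hx, hP, h]]
        simp only [List.map_cons, List.cons_append, List.zip_cons_cons, List.filter_cons]
        by_cases h : x ∈ bg
        · simpa [h] using hrest
        · simp only [h, not_false_eq_true, decide_true, if_pos rfl, ite_true, List.map_cons]
          rw [← hrest]

-- pvT in terms of A's characterisation pvSpec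
theorem T_spec (bg : List Int) (xs : List Int) : ∀ (x k s : Int),
    pvT bg x xs k s =
      ((if x ∉ bg then x :: (pvSpec bg x k xs).1 else (pvSpec bg x k xs).1),
       (if x ∉ bg then s :: (pvSpec bg x k xs).2.1 else (pvSpec bg x k xs).2.1),
       (pvSpec bg x k xs).2.2) := by
  induction xs with
  | nil =>
      intro x k s
      by_cases h : x ∉ bg <;> simp [pvT, pvSpec, h]
  | cons b t ih =>
      intro x k s
      by_cases hx : x = b
      · subst hx
        simp only [pvT, if_pos rfl, pvSpec, if_pos rfl]
        exact ih x (k + 1) s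
      · simp only [pvT, if_neg hx, pvSpec, if_neg (Ne.symm hx)]
        rw [ih b (k + 1) k]
        by_cases h1 : x ∉ bg <;> by_cases h2 : b ∉ bg <;> simp [h1, h2]

theorem B_cons (bg : List Int) (x : Int) (xs : List Int) :
    get_labels_start_end_time_alt (x :: xs) bg = pvT bg x xs 1 0 := by
  unfold get_labels_start_end_time_alt
  have hslice : PySem.List.slice (x :: xs) (some 1) none = xs := by
    rw [PySem.List.slice_from_one]; rfl
  have hfirst : PySem.List.pyGetD (x :: xs) (0 : Int) 0 = x := by
    simp [PySem.List.pyGetD, PySem.List.pyGet?, PySem.List.pyIdx?]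
  simp only [hslice, hfirst, chg_eq xs x 1]
  have hlen : (((x :: xs).length : Nat) : Int) = 1 + (xs.length : Int) := by
    simp; ring
  rw [hlen]
  exact keep_eq bg xs x 1 0

theorem main_eq (bg : List Int) (x : Int) (xs : List Int) :
    get_labels_start_end_time (x :: xs) bg = get_labels_start_end_time_alt (x :: xs) bg := by
  rw [A_cons, B_cons, T_spec]
  by_cases h : x ∉ bg <;> simp [h]

-- ===== VERDICT (by name: the statement is the Claim_ definition above) =====
theorem get_labels_start_end_time_spec : Claim_equal_get_labels_start_end_time := by
  intro frame_wise_labels bg_class _ hpre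
  unfold Spec_get_labels_start_end_time
  cases frame_wise_labels with
  | nil => exact absurd rfl hpre
  | cons x xs => exact main_eq bg_class x xs
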